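-- pv_equiv track=rewrite | github.com/drobinkent/P416CompilerBackend | src/RMTHardwareSimulator/RMTV1ModelHardware.py | getLargestPHVFieldsForGivenp4HeaderField
-- ===== SOURCE A (Python) =====
-- def getLargestPHVFieldsForGivenp4HeaderField(p4ProgramHeaderBitWidth,phvFieldSizeVsCountMap):
--     phvfieldSizes =[]
--     for pfSize in phvFieldSizeVsCountMap.keys():
--         pfCount = phvFieldSizeVsCountMap.get(pfSize)
--         for i in range (0, pfCount):
--             phvfieldSizes.append(pfSize)
--     phvfieldSizes.sort(reverse=True)
--     for phvFieldSize in phvfieldSizes: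
--         if (phvFieldSize<=p4ProgramHeaderBitWidth) and (phvFieldSizeVsCountMap.get(phvFieldSize)>0):
--             return phvFieldSize
--     phvfieldSizes.sort()
--     waste = 999999999
--     selectedPhvFieldWidth = None
--     for phvFieldSize in phvfieldSizes:
--         if((phvFieldSize - p4ProgramHeaderBitWidth)<waste ):
--             waste =phvFieldSize - p4ProgramHeaderBitWidth
--             selectedPhvFieldWidth = phvFieldSize
--     if(selectedPhvFieldWidth != None):
--         return  selectedPhvFieldWidth
--     return -1
-- ===== SOURCE B (Python) =====
-- def getLargestPHVFieldsForGivenp4HeaderField(p4ProgramHeaderBitWidth, phvFieldSizeVsCountMap):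
--     best_fit = None   # largest field size <= header width with positive count
--     best_min = None   # smallest field size with positive count
--     for size, count in phvFieldSizeVsCountMap.items():
--         if count > 0:
--             if size <= p4ProgramHeaderBitWidth and (best_fit is None or best_fit < size):
--                 best_fit = size
--             if best_min is None or size < best_min:
--                 best_min = size
--     if best_fit is not None:
--         return best_fit
--     if best_min is not None:
--         return best_min
--     return -1
-- ===== Notes on version B (the rewrite author's own statement) =====
-- stated objective: faster
-- what changed: B replaces A's expand-each-size-by-its-count list, two sorts and two scans with a single pass over the dict items that tracks the largest fitting size and the smallest positive-count size.
-- intended difference: On inputs where every positive-count size exceeds the header width by at least 999999999 (and the smallest such size is not -1), A's hard-coded waste sentinel 999999999 makes it return -1 although suitable sizes exist, while B returns the smallest positive-count size, which is the intended closest fit. — e.g. on getLargestPHVFieldsForGivenp4HeaderField(-1000000000, [(0, 1)]): A returns -1, B returns 0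
import Mathlib
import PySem

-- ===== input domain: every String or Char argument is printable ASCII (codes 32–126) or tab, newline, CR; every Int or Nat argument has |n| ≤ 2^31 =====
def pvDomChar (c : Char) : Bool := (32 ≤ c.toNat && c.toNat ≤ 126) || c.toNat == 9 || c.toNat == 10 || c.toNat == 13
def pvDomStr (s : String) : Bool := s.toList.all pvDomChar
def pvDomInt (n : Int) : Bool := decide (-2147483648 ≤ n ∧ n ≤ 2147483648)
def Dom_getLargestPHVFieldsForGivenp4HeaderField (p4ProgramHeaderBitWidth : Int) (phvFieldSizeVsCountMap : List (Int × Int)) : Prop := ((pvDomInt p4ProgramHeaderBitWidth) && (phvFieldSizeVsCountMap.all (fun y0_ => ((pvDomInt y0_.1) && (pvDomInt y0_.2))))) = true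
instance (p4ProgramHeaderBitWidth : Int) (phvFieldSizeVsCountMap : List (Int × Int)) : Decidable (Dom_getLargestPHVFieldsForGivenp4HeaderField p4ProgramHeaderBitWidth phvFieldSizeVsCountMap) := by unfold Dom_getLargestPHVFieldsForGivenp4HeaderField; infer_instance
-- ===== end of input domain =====

-- B replaces A's expansion of every size by its count, two sorts and two scans with one single
-- pass over the dict items tracking the largest fitting and the smallest positive-count size; on the
-- D_ corner A's hard-coded waste sentinel yields -1 while B returns the actual smallest size.


-- ===== PORT A =====
-- A's first loop: first element of the (descending-sorted) size list that fits and has a positive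
-- count (Python's `phvFieldSizeVsCountMap.get(phvFieldSize) > 0`: the key is always a key of the
-- dict here, so `.get(k) > 0` is exactly `getD d k 0 > 0`)
def pvFirstFit (w : Int) (d : PySem.Dict Int Int) : List Int → Option Int
  | [] => none
  | k :: rest => if k ≤ w ∧ 0 < PySem.Dict.getD d k 0 then some k else pvFirstFit w d rest

def getLargestPHVFieldsForGivenp4HeaderField (p4ProgramHeaderBitWidth : Int) (phvFieldSizeVsCountMap : List (Int × Int)) : Int :=
  let d := PySem.Dict.ofList phvFieldSizeVsCountMap
  let phvfieldSizes := (PySem.Dict.keys d).foldl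
      (fun acc pfSize =>
        (PySem.List.pyRange 0 (PySem.Dict.getD d pfSize 0) 1).foldl
          (fun acc2 _ => acc2 ++ [pfSize]) acc) []
  match pvFirstFit p4ProgramHeaderBitWidth d (PySem.List.sorted phvfieldSizes (fun x => x) true) with
  | some k => k
  | none =>
    let st := (PySem.List.sorted phvfieldSizes (fun x => x) false).foldl
        (fun (st : Int × Option Int) phvFieldSize =>
          if phvFieldSize - p4ProgramHeaderBitWidth < st.1 then
            (phvFieldSize - p4ProgramHeaderBitWidth, some phvFieldSize)
          else st)
        (999999999, none)
    match st.2 with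
    | some s => s
    | none => -1

-- ===== PORT B =====
-- one step of B's single pass: update (best_fit, best_min) with one (size, count) item
def pvStep (w : Int) (st : Option Int × Option Int) (kv : Int × Int) : Option Int × Option Int :=
  if 0 < kv.2 then
    ((match st.1 with
      | none => if kv.1 ≤ w then some kv.1 else none
      | some b => if kv.1 ≤ w ∧ b < kv.1 then some kv.1 else some b),
     (match st.2 with
      | none => some kv.1
      | some m => if kv.1 < m then some kv.1 else some m))
  else st

def getLargestPHVFieldsForGivenp4HeaderField_alt (p4ProgramHeaderBitWidth : Int) (phvFieldSizeVsCountMap : List (Int × Int)) : Int :=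
  let st := (PySem.Dict.ofList phvFieldSizeVsCountMap).items.foldl (pvStep p4ProgramHeaderBitWidth) (none, none)
  match st.1 with
  | some b => b
  | none =>
    match st.2 with
    | some m => m
    | none => -1

-- ===== PRECONDITION & SPEC =====
-- On inputs where the smallest positive-count size exceeds the header width by at least 999999999
-- (and is not -1), A's hard-coded waste sentinel 999999999 makes it return -1 although suitable
-- sizes exist; B returns that smallest positive-count size, the intended closest fit.
def D_getLargestPHVFieldsForGivenp4HeaderField (p4ProgramHeaderBitWidth : Int) (phvFieldSizeVsCountMap : List (Int × Int)) : Prop :=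
  ((((PySem.Dict.ofList phvFieldSizeVsCountMap).items.filter (fun kv => 0 < kv.2)).map (fun kv => kv.1)).min?.any
    (fun v => decide (999999999 ≤ v - p4ProgramHeaderBitWidth) && v != -1)) = true
instance (p4ProgramHeaderBitWidth : Int) (phvFieldSizeVsCountMap : List (Int × Int)) : Decidable (D_getLargestPHVFieldsForGivenp4HeaderField p4ProgramHeaderBitWidth phvFieldSizeVsCountMap) := by unfold D_getLargestPHVFieldsForGivenp4HeaderField; infer_instance

def Spec_getLargestPHVFieldsForGivenp4HeaderField (p4ProgramHeaderBitWidth : Int) (phvFieldSizeVsCountMap : List (Int × Int)) (out : Int) : Prop := ¬ D_getLargestPHVFieldsForGivenp4HeaderField p4ProgramHeaderBitWidth phvFieldSizeVsCountMap → out = getLargestPHVFieldsForGivenp4HeaderField_alt p4ProgramHeaderBitWidth phvFieldSizeVsCountMap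
instance (p4ProgramHeaderBitWidth : Int) (phvFieldSizeVsCountMap : List (Int × Int)) (out : Int) : Decidable (Spec_getLargestPHVFieldsForGivenp4HeaderField p4ProgramHeaderBitWidth phvFieldSizeVsCountMap out) := by unfold Spec_getLargestPHVFieldsForGivenp4HeaderField; infer_instance

def pvDiffWitness_getLargestPHVFieldsForGivenp4HeaderField : Int × (List (Int × Int)) := (-1000000000, [(0, 1)])
def pvDiffWitnessOut_getLargestPHVFieldsForGivenp4HeaderField : Int × Int := (-1, 0)

-- ===== CLAIM (what is proved, stated in full; the proofs are below) =====
def Claim_unchanged_getLargestPHVFieldsForGivenp4HeaderField : Prop := ∀ (p4ProgramHeaderBitWidth : Int) (phvFieldSizeVsCountMap : List (Int × Int)), Dom_getLargestPHVFieldsForGivenp4HeaderField p4ProgramHeaderBitWidth phvFieldSizeVsCountMap → Spec_getLargestPHVFieldsForGivenp4HeaderField p4ProgramHeaderBitWidth phvFieldSizeVsCountMap (getLargestPHVFieldsForGivenp4HeaderField p4ProgramHeaderBitWidth phvFieldSizeVsCountMap)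
def Claim_changed_getLargestPHVFieldsForGivenp4HeaderField : Prop := Dom_getLargestPHVFieldsForGivenp4HeaderField (pvDiffWitness_getLargestPHVFieldsForGivenp4HeaderField.1) (pvDiffWitness_getLargestPHVFieldsForGivenp4HeaderField.2) ∧ D_getLargestPHVFieldsForGivenp4HeaderField (pvDiffWitness_getLargestPHVFieldsForGivenp4HeaderField.1) (pvDiffWitness_getLargestPHVFieldsForGivenp4HeaderField.2) ∧ getLargestPHVFieldsForGivenp4HeaderField (pvDiffWitness_getLargestPHVFieldsForGivenp4HeaderField.1) (pvDiffWitness_getLargestPHVFieldsForGivenp4HeaderField.2) = pvDiffWitnessOut_getLargestPHVFieldsForGivenp4HeaderField.1 ∧ getLargestPHVFieldsForGivenp4HeaderField_alt (pvDiffWitness_getLargestPHVFieldsForGivenp4HeaderField.1) (pvDiffWitness_getLargestPHVFieldsForGivenp4HeaderField.2) = pvDiffWitnessOut_getLargestPHVFieldsForGivenp4HeaderField.2 ∧ pvDiffWitnessOut_getLargestPHVFieldsForGivenp4HeaderField.1 ≠ pvDiffWitnessOut_getLargestPHVFieldsForGivenp4HeaderField.2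
def Claim_exact_getLargestPHVFieldsForGivenp4HeaderField : Prop := ∀ (p4ProgramHeaderBitWidth : Int) (phvFieldSizeVsCountMap : List (Int × Int)), Dom_getLargestPHVFieldsForGivenp4HeaderField p4ProgramHeaderBitWidth phvFieldSizeVsCountMap → D_getLargestPHVFieldsForGivenp4HeaderField p4ProgramHeaderBitWidth phvFieldSizeVsCountMap → getLargestPHVFieldsForGivenp4HeaderField p4ProgramHeaderBitWidth phvFieldSizeVsCountMap ≠ getLargestPHVFieldsForGivenp4HeaderField_alt p4ProgramHeaderBitWidth phvFieldSizeVsCountMap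

-- ===== LEMMAS AND PROOFS =====
-- ===== proof-side helpers =====
-- the distinct sizes whose (dict-effective) count is positive
def pvPosKeys (phvFieldSizeVsCountMap : List (Int × Int)) : List Int :=
  ((PySem.Dict.ofList phvFieldSizeVsCountMap).items.filter (fun kv => 0 < kv.2)).map (fun kv => kv.1)

lemma pv_D_iff (w : Int) (m : List (Int × Int)) :
    D_getLargestPHVFieldsForGivenp4HeaderField w m ↔
      ∃ v, (pvPosKeys m).min? = some v ∧ 999999999 ≤ v - w ∧ v ≠ -1 := by
  unfold D_getLargestPHVFieldsForGivenp4HeaderField pvPosKeys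
  cases h : (((PySem.Dict.ofList m).items.filter (fun kv => 0 < kv.2)).map (fun kv => kv.1)).min? with
  | none => simp
  | some v => simp

def pvFitStep (w : Int) (st : Option Int) (k : Int) : Option Int :=
  match st with
  | none => if k ≤ w then some k else none
  | some b => if k ≤ w ∧ b < k then some k else some b

def pvMinStep (st : Option Int) (k : Int) : Option Int :=
  match st with
  | none => some k
  | some m => if k < m then some k else some m

def pvMaxStep (st : Option Int) (k : Int) : Option Int :=
  match st with
  | none => some k
  | some b => some (max b k)

lemma pv_step_split (w : Int) (L : List (Int × Int)) (st : Option Int × Option Int) :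
    L.foldl (pvStep w) st =
      (((L.filter (fun kv => 0 < kv.2)).map (fun kv => kv.1)).foldl (pvFitStep w) st.1,
       ((L.filter (fun kv => 0 < kv.2)).map (fun kv => kv.1)).foldl pvMinStep st.2) := by
  induction L generalizing st with
  | nil => rfl
  | cons kv t ih =>
    by_cases h : 0 < kv.2
    · simp [pvStep, h, ih, pvFitStep, pvMinStep]
    · simp [pvStep, h, ih]

lemma pv_fit_eq_max (w : Int) (S : List Int) (st : Option Int) :
    S.foldl (pvFitStep w) st = (S.filter (fun k => k ≤ w)).foldl pvMaxStep st := by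
  induction S generalizing st with
  | nil => rfl
  | cons k t ih =>
    by_cases h : k ≤ w
    · cases st with
      | none => simp [pvFitStep, pvMaxStep, h, ih]
      | some b =>
        by_cases hb : b < k
        · simp [pvFitStep, pvMaxStep, h, hb, ih, max_eq_right (le_of_lt hb)]
        · simp [pvFitStep, pvMaxStep, h, hb, ih, max_eq_left (le_of_not_gt hb)]
    · cases st with
      | none => simp [pvFitStep, h, ih]
      | some b => simp [pvFitStep, h, ih]

lemma pv_min_fold_some (S : List Int) (a : Int) :
    ∃ v, S.foldl pvMinStep (some a) = some v ∧ v ∈ a :: S ∧ ∀ k ∈ a :: S, v ≤ k := by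
  induction S generalizing a with
  | nil => exact ⟨a, rfl, by simp, by simp⟩
  | cons h t ih =>
    by_cases hlt : h < a
    · obtain ⟨v, hv, hmem, hle⟩ := ih h
      refine ⟨v, by simpa [pvMinStep, hlt] using hv, ?_, ?_⟩
      · rcases List.mem_cons.mp hmem with h1 | h1 <;> simp [h1]
      · intro k hk
        rcases List.mem_cons.mp hk with rfl | hk
        · exact le_trans (hle h (by simp)) (le_of_lt hlt)
        · exact hle k hk
    · obtain ⟨v, hv, hmem, hle⟩ := ih a
      refine ⟨v, by simpa [pvMinStep, hlt] using hv, ?_, ?_⟩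
      · rcases List.mem_cons.mp hmem with h1 | h1 <;> simp [h1]
      · intro k hk
        rcases List.mem_cons.mp hk with rfl | hk
        · exact hle k (by simp)
        · rcases List.mem_cons.mp hk with rfl | hk
          · exact le_trans (hle a (by simp)) (le_of_not_gt hlt)
          · exact hle k (by simp [hk])

lemma pv_min_fold_nonempty (S : List Int) (hS : S ≠ []) :
    ∃ v, S.foldl pvMinStep none = some v ∧ v ∈ S ∧ ∀ k ∈ S, v ≤ k := by
  cases S with
  | nil => exact absurd rfl hS
  | cons h t =>
    obtain ⟨v, hv, hmem, hle⟩ := pv_min_fold_some t h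
    exact ⟨v, by simpa [pvMinStep] using hv, hmem, hle⟩

lemma pv_max_fold_some (S : List Int) (a : Int) :
    ∃ v, S.foldl pvMaxStep (some a) = some v ∧ v ∈ a :: S ∧ ∀ k ∈ a :: S, k ≤ v := by
  induction S generalizing a with
  | nil => exact ⟨a, rfl, by simp, by simp⟩
  | cons h t ih =>
    obtain ⟨v, hv, hmem, hle⟩ := ih (max a h)
    refine ⟨v, by simpa [pvMaxStep] using hv, ?_, ?_⟩
    · rcases List.mem_cons.mp hmem with h1 | h1
      · rcases max_choice a h with hc | hc <;> simp [h1, hc]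
      · simp [h1]
    · intro j hj
      have hmax : max a h ≤ v := hle (max a h) (by simp)
      have hj' : j = a ∨ j = h ∨ j ∈ t := by simpa using hj
      rcases hj' with h1 | h1 | h1
      · exact h1 ▸ le_trans (le_max_left a h) hmax
      · exact h1 ▸ le_trans (le_max_right a h) hmax
      · exact hle j (by simp [h1])

lemma pv_max_fold_nonempty (S : List Int) (hS : S ≠ []) :
    ∃ v, S.foldl pvMaxStep none = some v ∧ v ∈ S ∧ ∀ k ∈ S, k ≤ v := by
  cases S with
  | nil => exact absurd rfl hS
  | cons h t =>
    obtain ⟨v, hv, hmem, hle⟩ := pv_max_fold_some t h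
    exact ⟨v, by simpa [pvMaxStep] using hv, hmem, hle⟩

-- ===== A-side =====
def pvSizes (m : List (Int × Int)) : List Int :=
  (PySem.Dict.keys (PySem.Dict.ofList m)).foldl
      (fun acc pfSize =>
        (PySem.List.pyRange 0 (PySem.Dict.getD (PySem.Dict.ofList m) pfSize 0) 1).foldl
          (fun acc2 _ => acc2 ++ [pfSize]) acc) []

lemma pv_sizes_eq (m : List (Int × Int)) :
    pvSizes m = (PySem.Dict.keys (PySem.Dict.ofList m)).flatMap
      (fun k => (PySem.List.pyRange 0 (PySem.Dict.getD (PySem.Dict.ofList m) k 0) 1).map (fun _ => k)) := by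
  unfold pvSizes
  have hin : ∀ (k : Int) (acc : List Int),
      (PySem.List.pyRange 0 (PySem.Dict.getD (PySem.Dict.ofList m) k 0) 1).foldl
        (fun acc2 _ => acc2 ++ [k]) acc
      = acc ++ (PySem.List.pyRange 0 (PySem.Dict.getD (PySem.Dict.ofList m) k 0) 1).map (fun _ => k) := by
    intro k acc
    exact PySem.List.foldl_append_singleton_eq_map _ _ _
  simp only [hin]
  exact PySem.List.foldl_append_eq_flatMap _ _ _

lemma pv_mem_posKeys (m : List (Int × Int)) (x : Int) :
    x ∈ pvPosKeys m ↔ x ∈ PySem.Dict.keys (PySem.Dict.ofList m) ∧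
      0 < PySem.Dict.getD (PySem.Dict.ofList m) x 0 := by
  unfold pvPosKeys
  constructor
  · intro hx
    obtain ⟨kv, hkv, rfl⟩ := List.mem_map.mp hx
    have h1 := List.mem_filter.mp hkv
    have hk : kv.1 ∈ (PySem.Dict.ofList m).keys := PySem.Dict.mem_keys_of_mem_items _ h1.1
    have hg : PySem.Dict.getD (PySem.Dict.ofList m) kv.1 0 = kv.2 := by
      have := PySem.Dict.getD_of_mem_items (d := PySem.Dict.ofList m) (k := kv.1) (v := kv.2)
        (by exact h1.1) (PySem.Dict.nodup_keys_ofList m) (d0 := 0)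
      exact this
    exact ⟨hk, by rw [hg]; exact of_decide_eq_true h1.2⟩
  · intro ⟨hk, hpos⟩
    have hitems := PySem.Dict.items_eq_map_keys (PySem.Dict.ofList m) (PySem.Dict.nodup_keys_ofList m) 0
    refine List.mem_map.mpr ⟨(x, PySem.Dict.getD (PySem.Dict.ofList m) x 0), ?_, rfl⟩
    refine List.mem_filter.mpr ⟨?_, by simpa using hpos⟩
    rw [hitems]
    exact List.mem_map.mpr ⟨x, hk, rfl⟩

lemma pv_mem_sizes (m : List (Int × Int)) (x : Int) :
    x ∈ pvSizes m ↔ x ∈ pvPosKeys m := by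
  rw [pv_sizes_eq, pv_mem_posKeys]
  simp only [List.mem_flatMap, List.mem_map]
  constructor
  · rintro ⟨k, hk, _, hr, rfl⟩
    have := (PySem.List.mem_pyRange_one).mp hr
    exact ⟨hk, by omega⟩
  · rintro ⟨hk, hpos⟩
    exact ⟨x, hk, 0, (PySem.List.mem_pyRange_one).mpr ⟨le_refl 0, hpos⟩, rfl⟩

lemma pv_firstFit_none (w : Int) (d : PySem.Dict Int Int) (L : List Int)
    (h : ∀ x ∈ L, ¬ (x ≤ w ∧ 0 < PySem.Dict.getD d x 0)) : pvFirstFit w d L = none := by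
  induction L with
  | nil => rfl
  | cons k t ih =>
    rw [pvFirstFit, if_neg (h k (by simp))]
    exact ih (fun x hx => h x (by simp [hx]))

lemma pv_firstFit_max (w : Int) (d : PySem.Dict Int Int) (L : List Int) (v : Int)
    (hpair : L.Pairwise (fun a b => b ≤ a))
    (hpos : ∀ x ∈ L, 0 < PySem.Dict.getD d x 0)
    (hv : v ∈ L) (hvw : v ≤ w) (hmax : ∀ x ∈ L, x ≤ w → x ≤ v) :
    pvFirstFit w d L = some v := by
  induction L with
  | nil => exact absurd hv (by simp)
  | cons k t ih =>
    by_cases hk : k ≤ w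
    · have hkv : k = v := by
        have h1 : k ≤ v := hmax k (by simp) hk
        have h2 : v ≤ k := by
          rcases List.mem_cons.mp hv with h | h
          · omega
          · exact (List.pairwise_cons.mp hpair).1 v h
        omega
      rw [pvFirstFit, if_pos ⟨hk, hpos k (by simp)⟩, hkv]
    · have hvt : v ∈ t := by
        rcases List.mem_cons.mp hv with h | h
        · omega
        · exact h
      rw [pvFirstFit, if_neg (by tauto)]
      exact ih (List.pairwise_cons.mp hpair).2 (fun x hx => hpos x (by simp [hx])) hvt
        (fun x hx => hmax x (by simp [hx]))

lemma pv_stay (w : Int) (t : List Int) (st : Int × Option Int)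
    (h : ∀ k ∈ t, ¬ (k - w < st.1)) :
    t.foldl (fun (st : Int × Option Int) phvFieldSize =>
        if phvFieldSize - w < st.1 then (phvFieldSize - w, some phvFieldSize) else st) st = st := by
  induction t with
  | nil => rfl
  | cons k r ih =>
    rw [List.foldl_cons, if_neg (h k (by simp))]
    exact ih (fun x hx => h x (by simp [hx]))

lemma pv_A_eq (w : Int) (m : List (Int × Int)) :
    getLargestPHVFieldsForGivenp4HeaderField w m =
      (match pvFirstFit w (PySem.Dict.ofList m) (PySem.List.sorted (pvSizes m) (fun x => x) true) with
       | some k => k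
       | none =>
         match ((PySem.List.sorted (pvSizes m) (fun x => x) false).foldl
             (fun (st : Int × Option Int) s => if s - w < st.1 then (s - w, some s) else st)
             (999999999, none)).2 with
         | some s => s
         | none => -1) := rfl

lemma pv_B_eq (w : Int) (m : List (Int × Int)) :
    getLargestPHVFieldsForGivenp4HeaderField_alt w m =
      (match (pvPosKeys m).foldl (pvFitStep w) none with
       | some b => b
       | none =>
         match (pvPosKeys m).foldl pvMinStep none with
         | some v => v
         | none => -1) := by
  unfold getLargestPHVFieldsForGivenp4HeaderField_alt
  rw [pv_step_split]
  rfl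

theorem pv_main (w : Int) (m : List (Int × Int))
    (hnD : ¬ D_getLargestPHVFieldsForGivenp4HeaderField w m) :
    getLargestPHVFieldsForGivenp4HeaderField w m = getLargestPHVFieldsForGivenp4HeaderField_alt w m := by
  rw [pv_A_eq, pv_B_eq]
  have hmemT : ∀ x : Int, x ∈ PySem.List.sorted (pvSizes m) (fun y => y) true ↔ x ∈ pvPosKeys m := by
    intro x; rw [PySem.List.mem_sorted]; exact pv_mem_sizes m x
  have hmemF : ∀ x : Int, x ∈ PySem.List.sorted (pvSizes m) (fun y => y) false ↔ x ∈ pvPosKeys m := by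
    intro x; rw [PySem.List.mem_sorted]; exact pv_mem_sizes m x
  have hpos : ∀ x ∈ pvPosKeys m, 0 < PySem.Dict.getD (PySem.Dict.ofList m) x 0 :=
    fun x hx => ((pv_mem_posKeys m x).mp hx).2
  by_cases hF : (pvPosKeys m).filter (fun k => k ≤ w) = []
  · -- no size fits: A's first loop finds nothing, B's best_fit is none
    have hnofit : ∀ x ∈ pvPosKeys m, ¬ x ≤ w := by
      intro x hx hxw
      have : x ∈ (pvPosKeys m).filter (fun k => k ≤ w) :=
        List.mem_filter.mpr ⟨hx, by simpa using hxw⟩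
      simp [hF] at this
    rw [pv_firstFit_none w _ _ (by
      intro x hx ⟨hxw, _⟩
      exact hnofit x ((hmemT x).mp hx) hxw)]
    rw [pv_fit_eq_max, hF]
    simp only [List.foldl_nil]
    by_cases hS : pvPosKeys m = []
    · have hsz : pvSizes m = [] := by
        rw [List.eq_nil_iff_forall_not_mem]
        intro x hx
        exact (List.ne_nil_of_mem ((pv_mem_sizes m x).mp hx)) hS
      rw [hsz, hS]
      rfl
    · obtain ⟨v, hvfold, hvmem, hvmin⟩ := pv_min_fold_nonempty _ hS
      rw [hvfold]
      have hne : PySem.List.sorted (pvSizes m) (fun y => y) false ≠ [] :=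
        List.ne_nil_of_mem ((hmemF v).mpr hvmem)
      obtain ⟨m0, t, hasc⟩ := List.exists_cons_of_ne_nil hne
      have hm0S : m0 ∈ pvPosKeys m := (hmemF m0).mp (by rw [hasc]; simp)
      have hm0min : ∀ y ∈ pvPosKeys m, m0 ≤ y := by
        intro y hy
        have hk := PySem.List.key_head_sorted_le (h := hasc)
        simpa using hk y ((pv_mem_sizes m y).mpr hy)
      have hveq : v = m0 := le_antisymm (hvmin m0 hm0S) (hm0min v hvmem)
      have htmem : ∀ k ∈ t, m0 ≤ k := by
        intro k hk
        exact hm0min k ((hmemF k).mp (by rw [hasc]; simp [hk]))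
      rw [hasc, List.foldl_cons]
      by_cases hlt : m0 - w < 999999999
      · rw [if_pos hlt]
        rw [pv_stay w t (m0 - w, some m0) (by intro k hk; have := htmem k hk; simp; omega)]
        simp [hveq]
      · rw [if_neg hlt]
        rw [pv_stay w t (999999999, none) (by intro k hk; have := htmem k hk; simp; omega)]
        have hmin : (pvPosKeys m).min? = some v :=
          List.min?_eq_some_iff_subtype.mpr ⟨hvmem, hvmin⟩
        have : v = -1 := by
          by_contra hne
          exact hnD ((pv_D_iff w m).mpr ⟨v, hmin, by omega, hne⟩)
        simp [this]
  · -- some size fits: both return the largest fitting size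
    obtain ⟨v, hvfold, hvmem, hvmax⟩ := pv_max_fold_nonempty _ hF
    have hv1 := List.mem_filter.mp hvmem
    have hvS : v ∈ pvPosKeys m := hv1.1
    have hvw : v ≤ w := by simpa using hv1.2
    rw [pv_fit_eq_max, hvfold]
    rw [pv_firstFit_max w _ _ v
      (by simpa using PySem.List.sorted_pairwise_rev (pvSizes m) (fun y => y))
      (fun x hx => hpos x ((hmemT x).mp hx))
      ((hmemT v).mpr hvS) hvw
      (by
        intro x hx hxw
        exact hvmax x (List.mem_filter.mpr ⟨(hmemT x).mp hx, by simpa using hxw⟩))]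

theorem pv_tight (w : Int) (m : List (Int × Int))
    (hD : D_getLargestPHVFieldsForGivenp4HeaderField w m) :
    getLargestPHVFieldsForGivenp4HeaderField w m ≠ getLargestPHVFieldsForGivenp4HeaderField_alt w m := by
  obtain ⟨v0, hmin0, hbig0, hne0⟩ := (pv_D_iff w m).mp hD
  obtain ⟨hv0mem, hv0min⟩ := List.min?_eq_some_iff_subtype.mp hmin0
  have hS : pvPosKeys m ≠ [] := List.ne_nil_of_mem hv0mem
  have hbig : ∀ k ∈ pvPosKeys m, 999999999 ≤ k - w := by
    intro k hk; have := hv0min k hk; omega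
  rw [pv_A_eq, pv_B_eq]
  have hmemT : ∀ x : Int, x ∈ PySem.List.sorted (pvSizes m) (fun y => y) true ↔ x ∈ pvPosKeys m := by
    intro x; rw [PySem.List.mem_sorted]; exact pv_mem_sizes m x
  have hmemF : ∀ x : Int, x ∈ PySem.List.sorted (pvSizes m) (fun y => y) false ↔ x ∈ pvPosKeys m := by
    intro x; rw [PySem.List.mem_sorted]; exact pv_mem_sizes m x
  have hF : (pvPosKeys m).filter (fun k => k ≤ w) = [] := by
    rw [List.eq_nil_iff_forall_not_mem]
    intro x hx
    have h1 := List.mem_filter.mp hx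
    have := hbig x h1.1
    have : x ≤ w := by simpa using h1.2
    omega
  rw [pv_firstFit_none w _ _ (by
    intro x hx ⟨hxw, _⟩
    have := hbig x ((hmemT x).mp hx)
    omega)]
  rw [pv_fit_eq_max, hF]
  simp only [List.foldl_nil]
  obtain ⟨v, hvfold, hvmem, hvmin⟩ := pv_min_fold_nonempty _ hS
  rw [hvfold]
  have hvne : v ≠ -1 := by
    have : v = v0 := le_antisymm (hvmin v0 hv0mem) (hv0min v hvmem)
    omega
  have hstay : (PySem.List.sorted (pvSizes m) (fun y => y) false).foldl
      (fun (st : Int × Option Int) s => if s - w < st.1 then (s - w, some s) else st)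
      (999999999, none) = (999999999, none) := by
    apply pv_stay
    intro k hk
    have := hbig k ((hmemF k).mp hk)
    simp; omega
  rw [hstay]
  simpa using fun h => hvne h.symm


-- ===== VERDICT (by name: the statement is the Claim_ definition above) =====
theorem getLargestPHVFieldsForGivenp4HeaderField_spec : Claim_unchanged_getLargestPHVFieldsForGivenp4HeaderField := by
  intro w m _
  unfold Spec_getLargestPHVFieldsForGivenp4HeaderField
  exact pv_main w m
theorem getLargestPHVFieldsForGivenp4HeaderField_changed : Claim_changed_getLargestPHVFieldsForGivenp4HeaderField := by
  unfold Claim_changed_getLargestPHVFieldsForGivenp4HeaderField; decide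
theorem getLargestPHVFieldsForGivenp4HeaderField_tight : Claim_exact_getLargestPHVFieldsForGivenp4HeaderField := by
  intro w m _ hD
  exact pv_tight w m hD
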